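-- pv_equiv track=rewrite | github.com/shauryapednekar/HMC-CourseScheduler-LP | optimizer2.py | remove_prev_courses
-- ===== SOURCE A (Python) =====
-- def remove_prev_courses(all_prev_courses, possible_courses):
--     """Removes previously taken courses.
--
--     Global Variables Needed:
--         all_prev_courses (dict, optional): user"s previously taken courses.
--         Defaults to all_prev_courses.
--         possible_courses (list, optional): Defaults to possible_courses.
--
--     Returns:
--         list: removes previously taken courses (all sections) from list of
--         possible courses
--     """
--     # All sections of previously taken courses that are currently being offered
--     repeated = set()
--
--     for course in possible_courses:
--         for prev_course in all_prev_courses: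
--             # To find all sections of the prev_course
--             if prev_course in course:
--                 repeated.add(course)
--
--     # possible_courses minus repeated
--     output = []
--     for course in possible_courses:
--         if course not in repeated:
--             output.append(course)
--
--     return output
-- ===== SOURCE B (Python) =====
-- def remove_prev_courses(all_prev_courses, possible_courses):
--     # Multi-pattern windowed matching: hash the previous course names into a set,
--     # then for each course probe only the windows whose length some pattern has.
--     patterns = set(all_prev_courses)
--     lengths = sorted({len(p) for p in all_prev_courses})
--     output = []
--     for course in possible_courses:
--         n = len(course)
--         if not any(course[i:i + L] in patterns
--                    for L in lengths
--                    for i in range(n - L + 1)):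
--             output.append(course)
--     return output
-- ===== Notes on version B (the rewrite author's own statement) =====
-- stated objective: faster
-- what changed: Replaces A's per-course scan over every previous course (nested 'prev in course' tests plus a second pass against a 'repeated' set) by set-based multi-pattern window matching: the previous courses are hashed into a set once, their distinct lengths collected, and each course is tested by sliding windows of exactly those lengths with O(1) set lookups, removing the per-pattern factor P.
import Mathlib
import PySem

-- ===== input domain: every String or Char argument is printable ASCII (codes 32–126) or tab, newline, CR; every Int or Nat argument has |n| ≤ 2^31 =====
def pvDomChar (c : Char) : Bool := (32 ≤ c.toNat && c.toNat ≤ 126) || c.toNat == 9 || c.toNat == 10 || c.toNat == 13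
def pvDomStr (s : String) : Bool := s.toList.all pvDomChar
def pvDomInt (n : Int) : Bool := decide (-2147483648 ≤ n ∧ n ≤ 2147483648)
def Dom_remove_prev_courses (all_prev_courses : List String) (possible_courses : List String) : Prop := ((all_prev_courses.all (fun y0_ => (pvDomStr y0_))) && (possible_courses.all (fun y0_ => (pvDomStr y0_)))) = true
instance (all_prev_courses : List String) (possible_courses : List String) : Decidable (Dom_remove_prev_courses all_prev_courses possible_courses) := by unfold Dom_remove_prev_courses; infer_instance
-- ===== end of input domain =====

-- B replaces A's per-course scan over all previous courses by set-based window matching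
-- (patterns hashed into a set, windows of the distinct pattern lengths probed); measured faster in a timing run.


-- ===== PORT A =====
def remove_prev_courses (all_prev_courses : List String) (possible_courses : List String) : List String :=
  -- repeated = set(); for course in possible: for prev in all_prev: if prev in course: repeated.add(course)
  let repeated : PySem.Set String :=
    possible_courses.foldl (fun rep course =>
      all_prev_courses.foldl (fun rep prev_course =>
        if PySem.Str.isIn prev_course course then PySem.Set.add rep course else rep) rep)
      PySem.Set.empty
  -- output = []; for course in possible: if course not in repeated: output.append(course)
  possible_courses.foldl (fun output course =>
    if PySem.Set.contains repeated course then output else output ++ [course]) []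

-- ===== PORT B =====
def remove_prev_courses_alt (all_prev_courses : List String) (possible_courses : List String) : List String :=
  -- patterns = set(all_prev_courses); lengths = sorted({len(p) for p in all_prev_courses})
  let patterns : PySem.Set String := PySem.Set.ofList all_prev_courses
  let lengths : List Int :=
    PySem.List.sorted (PySem.Set.ofList (all_prev_courses.map PySem.Str.len)) (fun x => x) false
  -- for course in possible: if not any(course[i:i+L] in patterns for L in lengths for i in range(n-L+1)): output.append(course)
  possible_courses.foldl (fun output course =>
    if !(lengths.any (fun L =>
          (PySem.List.pyRange 0 (PySem.Str.len course - L + 1)).any (fun i =>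
            PySem.Set.contains patterns (PySem.Str.slice course (some i) (some (i + L)))))) then
      output ++ [course]
    else output) []

-- ===== PRECONDITION & SPEC =====
def Spec_remove_prev_courses (all_prev_courses : List String) (possible_courses : List String) (out : List String) : Prop := out = remove_prev_courses_alt all_prev_courses possible_courses
instance (all_prev_courses : List String) (possible_courses : List String) (out : List String) : Decidable (Spec_remove_prev_courses all_prev_courses possible_courses out) := by unfold Spec_remove_prev_courses; infer_instance

-- ===== CLAIM (what is proved, stated in full; the proofs are below) =====
def Claim_equal_remove_prev_courses : Prop := ∀ (all_prev_courses : List String) (possible_courses : List String), Dom_remove_prev_courses all_prev_courses possible_courses → Spec_remove_prev_courses all_prev_courses possible_courses (remove_prev_courses all_prev_courses possible_courses)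

-- ===== LEMMAS AND PROOFS =====

-- A-SIDE: membership in the inner fold (one course against all prev courses)
theorem pv_mem_inner (a : List String) (c x : String) (r : PySem.Set String) :
    x ∈ a.foldl (fun rep p => if PySem.Str.isIn p c then PySem.Set.add rep c else rep) r ↔
      x ∈ r ∨ (x = c ∧ a.any (fun p => PySem.Str.isIn p c)) := by
  induction a generalizing r with
  | nil => simp
  | cons h t ih =>
    rw [List.foldl_cons, List.any_cons]
    by_cases hp : PySem.Str.isIn h c = true
    · rw [if_pos hp, ih, PySem.Set.mem_add, hp]
      simp only [Bool.true_or, and_true]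
      tauto
    · rw [if_neg hp, ih]
      rw [Bool.not_eq_true] at hp
      rw [hp]
      simp only [Bool.false_or]

-- A-SIDE: membership in the 'repeated' set built by A's first double loop
theorem pv_mem_repeated (a p : List String) (x : String) (r : PySem.Set String) :
    x ∈ p.foldl (fun rep c =>
        a.foldl (fun rep q => if PySem.Str.isIn q c then PySem.Set.add rep c else rep) rep) r ↔
      x ∈ r ∨ (x ∈ p ∧ a.any (fun q => PySem.Str.isIn q x)) := by
  induction p generalizing r with
  | nil => simp
  | cons h t ih =>
    rw [List.foldl_cons, ih, pv_mem_inner]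
    simp only [List.mem_cons]
    constructor
    · rintro ((h1 | ⟨rfl, h2⟩) | ⟨h1, h2⟩)
      · exact Or.inl h1
      · exact Or.inr ⟨Or.inl rfl, h2⟩
      · exact Or.inr ⟨Or.inr h1, h2⟩
    · rintro (h1 | ⟨(rfl | h1), h2⟩)
      · exact Or.inl (Or.inl h1)
      · exact Or.inl (Or.inr ⟨rfl, h2⟩)
      · exact Or.inr ⟨h1, h2⟩

-- A-SIDE: the second loop ('if course not in repeated: output.append(course)') is a filter
theorem pv_out_loop (p : List String) (s : PySem.Set String) (acc : List String) :
    p.foldl (fun out c => if PySem.Set.contains s c then out else out ++ [c]) acc =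
      acc ++ p.filter (fun c => !(PySem.Set.contains s c)) := by
  induction p generalizing acc with
  | nil => simp
  | cons h t ih =>
    rw [List.foldl_cons, List.filter_cons]
    by_cases hc : PySem.Set.contains s h = true
    · rw [if_pos hc, ih, hc]
      simp
    · rw [if_neg hc, ih]
      rw [Bool.not_eq_true] at hc
      rw [hc]
      simp

-- B-SIDE: a window course[i:i+L] (0 ≤ i, 0 ≤ L) is an infix of course
theorem pv_slice_infix (c : String) (i L : Int) (hi : 0 ≤ i) (hL : 0 ≤ L) :
    (PySem.Str.slice c (some i) (some (i + L))).toList <:+: c.toList := by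
  rw [PySem.Str.toList_slice, PySem.Chars.slice_eq_listSlice,
      PySem.List.slice_toNat _ hi (by omega)]
  exact (List.take_prefix _ _).isInfix.trans (List.drop_suffix _ _).isInfix

-- B-SIDE: the window test over the distinct pattern lengths equals A's per-pattern substring test
theorem pv_matched (a : List String) (c : String) :
    ((PySem.List.sorted (PySem.Set.ofList (a.map PySem.Str.len)) (fun x => x) false).any (fun L =>
        (PySem.List.pyRange 0 (PySem.Str.len c - L + 1)).any (fun i =>
          PySem.Set.contains (PySem.Set.ofList a) (PySem.Str.slice c (some i) (some (i + L)))))) =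
      a.any (fun q => PySem.Str.isIn q c) := by
  rw [Bool.eq_iff_iff]
  simp only [List.any_eq_true]
  constructor
  · rintro ⟨L, hL, i, hi, hc⟩
    have hLmem : L ∈ a.map PySem.Str.len :=
      (PySem.Set.mem_ofList _ _).mp (((PySem.List.sorted_perm _ _ _).mem_iff).mp hL)
    obtain ⟨q, _, rfl⟩ := List.mem_map.mp hLmem
    have hi' := PySem.List.mem_pyRange_one.mp hi
    have hq : (PySem.Str.slice c (some i) (some (i + PySem.Str.len q))) ∈ a := by
      have := (PySem.Set.contains_iff _ _).mp hc
      rwa [PySem.Set.mem_ofList] at this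
    refine ⟨_, hq, ?_⟩
    rw [PySem.Str.isIn_iff_infix]
    exact pv_slice_infix c i (PySem.Str.len q) hi'.1 (by rw [PySem.Str.len_eq]; positivity)
  · rintro ⟨q, hq, hin⟩
    have hinf : q.toList <:+: c.toList := (PySem.Str.isIn_iff_infix q c).mp hin
    obtain ⟨j, hpre⟩ := (PySem.Chars.exists_prefix_drop_iff_isIn q.toList c.toList).mpr
      (by rw [← PySem.Str.isIn_eq] at *; exact hin)
    -- choose j within range (if j overshoots, q must be empty; use j = 0 then)
    have hLmem : PySem.Str.len q ∈ PySem.List.sorted (PySem.Set.ofList (a.map PySem.Str.len)) (fun x => x) false := by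
      rw [(PySem.List.sorted_perm _ _ _).mem_iff, PySem.Set.mem_ofList]
      exact List.mem_map.mpr ⟨q, hq, rfl⟩
    refine ⟨PySem.Str.len q, hLmem, ?_⟩
    by_cases hqnil : q.toList = []
    · refine ⟨0, ?_, ?_⟩
      · rw [PySem.List.mem_pyRange_one]
        have : PySem.Str.len q = 0 := by rw [PySem.Str.len_eq, hqnil]; rfl
        rw [this, PySem.Str.len_eq]
        constructor <;> omega
      · rw [PySem.Set.contains_iff, PySem.Set.mem_ofList]
        have : PySem.Str.slice c (some 0) (some (0 + PySem.Str.len q)) = q := by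
          apply String.toList_inj.mp
          rw [PySem.Str.toList_slice, PySem.Chars.slice_eq_listSlice,
              PySem.List.slice_toNat _ le_rfl (by rw [PySem.Str.len_eq]; positivity), hqnil]
          simp [PySem.Str.len_eq, hqnil]
        rw [this]; exact hq
    · -- q nonempty: the prefix forces j + len q ≤ len c
      have hlen : q.toList.length ≤ (c.toList.drop j).length := hpre.length_le
      have hj : j + q.toList.length ≤ c.toList.length := by
        rw [List.length_drop] at hlen
        have : q.toList.length ≠ 0 := by simpa using hqnil
        omega
      refine ⟨(j : Int), ?_, ?_⟩
      · rw [PySem.List.mem_pyRange_one, PySem.Str.len_eq, PySem.Str.len_eq]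
        exact ⟨by positivity, by omega⟩
      · rw [PySem.Set.contains_iff, PySem.Set.mem_ofList]
        have : PySem.Str.slice c (some (j : Int)) (some ((j : Int) + PySem.Str.len q)) = q := by
          apply String.toList_inj.mp
          rw [PySem.Str.toList_slice, PySem.Chars.slice_eq_listSlice, PySem.Str.len_eq,
              PySem.List.slice_toNat _ (by positivity) (by positivity)]
          have htn : ((j : Int) + (q.toList.length : Int)).toNat - (j : Int).toNat
              = q.toList.length := by omega
          rw [htn, Int.toNat_natCast]
          exact List.prefix_iff_eq_take.mp hpre ▸ rfl
        rw [this]; exact hq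

-- B-SIDE: B's loop is a filter by the window test
theorem pv_b_loop (a p : List String) :
    remove_prev_courses_alt a p =
      p.filter (fun c => !(a.any (fun q => PySem.Str.isIn q c))) := by
  unfold remove_prev_courses_alt
  simp only []
  rw [PySem.List.foldl_append_if_eq_filter, List.nil_append]
  apply List.filter_congr
  intro c _
  rw [pv_matched]

-- ===== VERDICT (by name: the statement is the Claim_ definition above) =====
theorem remove_prev_courses_spec : Claim_equal_remove_prev_courses := by
  intro a p _
  show remove_prev_courses a p = remove_prev_courses_alt a p
  rw [pv_b_loop]
  unfold remove_prev_courses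
  rw [pv_out_loop, List.nil_append]
  apply List.filter_congr
  intro c hc
  have hiff := pv_mem_repeated a p c PySem.Set.empty
  simp only [PySem.Set.empty, List.not_mem_nil, false_or] at hiff
  by_cases hmem : c ∈ p.foldl (fun rep c =>
      a.foldl (fun rep q => if PySem.Str.isIn q c then PySem.Set.add rep c else rep) rep)
      PySem.Set.empty
  · have h2 := (hiff.mp hmem).2
    have h3 : PySem.Set.contains (p.foldl (fun rep c =>
        a.foldl (fun rep q => if PySem.Str.isIn q c then PySem.Set.add rep c else rep) rep)
        PySem.Set.empty) c = true := (PySem.Set.contains_iff _ _).mpr hmem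
    rw [h3, h2]
  · have h2 : a.any (fun q => PySem.Str.isIn q c) = false := by
      by_contra hne
      rw [Bool.not_eq_false] at hne
      exact hmem (hiff.mpr ⟨hc, hne⟩)
    have h3 : PySem.Set.contains (p.foldl (fun rep c =>
        a.foldl (fun rep q => if PySem.Str.isIn q c then PySem.Set.add rep c else rep) rep)
        PySem.Set.empty) c = false := by
      by_contra hne
      rw [Bool.not_eq_false, PySem.Set.contains_iff] at hne
      exact hmem hne
    rw [h3, h2]
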